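-- pv_equiv track=rewrite | github.com/Currie32/biolink-hub | bioextract/dictionaries/download.py | _classify_mesh_entry
-- ===== SOURCE A (Python) =====
-- def _classify_mesh_entry(tree_numbers: list[str]) -> str:
--     """Classify a MeSH entry by its tree number prefix."""
--     # Priority order: prefer more specific classifications
--     for tn in tree_numbers:
--         if tn.startswith("C"):  # Diseases
--             return "DISEASE"
--     for tn in tree_numbers:
--         if tn.startswith("D"):  # Chemicals and Drugs
--             return "CHEMICAL"
--     for tn in tree_numbers:
--         if tn.startswith("B"):  # Organisms
--             return "ORGANISM"
--     for tn in tree_numbers: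
--         if tn.startswith("A"):  # Anatomy
--             return "ANATOMICAL_STRUCTURE"
--     for tn in tree_numbers:
--         if tn.startswith("G"):  # Phenomena and Processes
--             return "BIOLOGICAL_PROCESS"
--     for tn in tree_numbers:
--         if tn.startswith("F"):  # Psychiatry and Psychology
--             return "PHENOTYPE"
--     return "CHEMICAL"  # Default for unclassified
-- ===== SOURCE B (Python) =====
-- _RANK = {"C": 0, "D": 1, "B": 2, "A": 3, "G": 4, "F": 5}
-- _LABELS = ["DISEASE", "CHEMICAL", "ORGANISM", "ANATOMICAL_STRUCTURE",
--            "BIOLOGICAL_PROCESS", "PHENOTYPE", "CHEMICAL"]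
--
--
-- def _classify_mesh_entry(tree_numbers: list[str]) -> str:
--     """Classify a MeSH entry by its tree number prefix.
--
--     Single pass: track the minimum priority rank of any leading letter seen;
--     rank 6 (nothing classifiable) maps to the default 'CHEMICAL'.
--     """
--     best = 6
--     for tn in tree_numbers:
--         best = min(best, _RANK.get(tn[:1], 6))
--     return _LABELS[best]
-- ===== Notes on version B (the rewrite author's own statement) =====
-- stated objective: faster
-- what changed: Replaces A's six staged early-exit scans (one per prefix letter) by a single pass that maintains the minimum priority rank of the leading letters seen, then indexes a fixed label table by that rank.
import Mathlib
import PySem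

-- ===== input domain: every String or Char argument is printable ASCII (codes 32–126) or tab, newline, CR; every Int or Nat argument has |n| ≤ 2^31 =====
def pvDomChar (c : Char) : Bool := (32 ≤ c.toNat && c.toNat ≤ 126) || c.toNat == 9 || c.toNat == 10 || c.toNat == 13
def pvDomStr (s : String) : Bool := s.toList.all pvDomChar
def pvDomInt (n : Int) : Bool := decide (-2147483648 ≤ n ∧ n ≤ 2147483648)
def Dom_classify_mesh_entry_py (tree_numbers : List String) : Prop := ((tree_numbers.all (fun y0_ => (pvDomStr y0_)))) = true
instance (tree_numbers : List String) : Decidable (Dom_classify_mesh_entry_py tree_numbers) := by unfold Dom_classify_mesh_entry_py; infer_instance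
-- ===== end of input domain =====

-- B replaces A's six staged scans by one pass keeping the minimum priority rank of the leading letters, then a table lookup (alternative decomposition).

-- ===== PORT A =====
-- Each 'for tn in …: if tn.startswith(c): return …' scan is the early-exit scan List.any.
def classify_mesh_entry_py (tree_numbers : List String) : String :=
  if tree_numbers.any (fun tn => PySem.Str.startswith tn "C") then "DISEASE"
  else if tree_numbers.any (fun tn => PySem.Str.startswith tn "D") then "CHEMICAL"
  else if tree_numbers.any (fun tn => PySem.Str.startswith tn "B") then "ORGANISM"
  else if tree_numbers.any (fun tn => PySem.Str.startswith tn "A") then "ANATOMICAL_STRUCTURE"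
  else if tree_numbers.any (fun tn => PySem.Str.startswith tn "G") then "BIOLOGICAL_PROCESS"
  else if tree_numbers.any (fun tn => PySem.Str.startswith tn "F") then "PHENOTYPE"
  else "CHEMICAL"

-- ===== PORT B =====
def pvRank : PySem.Dict String Nat :=
  PySem.Dict.ofList [("C", 0), ("D", 1), ("B", 2), ("A", 3), ("G", 4), ("F", 5)]

def pvLabels : List String :=
  ["DISEASE", "CHEMICAL", "ORGANISM", "ANATOMICAL_STRUCTURE",
   "BIOLOGICAL_PROCESS", "PHENOTYPE", "CHEMICAL"]

def classify_mesh_entry_py_alt (tree_numbers : List String) : String :=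
  let best : Nat :=
    tree_numbers.foldl
      (fun b tn => min b (PySem.Dict.getD pvRank (PySem.Str.slice tn none (some 1)) 6)) 6
  -- best ≤ 6 always, so the Python index _LABELS[best] never raises; the Option default is unreachable
  (PySem.List.pyGet? pvLabels (Int.ofNat best)).getD "CHEMICAL"

-- ===== PRECONDITION & SPEC =====
def Spec_classify_mesh_entry_py (tree_numbers : List String) (out : String) : Prop := out = classify_mesh_entry_py_alt tree_numbers
instance (tree_numbers : List String) (out : String) : Decidable (Spec_classify_mesh_entry_py tree_numbers out) := by unfold Spec_classify_mesh_entry_py; infer_instance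

-- ===== CLAIM (what is proved, stated in full; the proofs are below) =====
def Claim_equal_classify_mesh_entry_py : Prop := ∀ (tree_numbers : List String), Dom_classify_mesh_entry_py tree_numbers → Spec_classify_mesh_entry_py tree_numbers (classify_mesh_entry_py tree_numbers)

-- ===== LEMMAS AND PROOFS =====

-- shorthand for B's per-element rank (proof-side only)
def pvRankOf (tn : String) : Nat :=
  PySem.Dict.getD pvRank (PySem.Str.slice tn none (some 1)) 6

-- the rank lookup as an explicit branch on the one-character prefix
theorem pvRankOf_eq (tn : String) :
    pvRankOf tn =
      (if PySem.Str.slice tn none (some 1) == "C" then 0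
       else if PySem.Str.slice tn none (some 1) == "D" then 1
       else if PySem.Str.slice tn none (some 1) == "B" then 2
       else if PySem.Str.slice tn none (some 1) == "A" then 3
       else if PySem.Str.slice tn none (some 1) == "G" then 4
       else if PySem.Str.slice tn none (some 1) == "F" then 5
       else 6) := by
  unfold pvRankOf pvRank
  simp only [PySem.Dict.ofList, PySem.Dict.update, beq_iff_eq]
  split_ifs with h1 h2 h3 h4 h5 h6
  · rw [h1]; decide
  · rw [h2]; decide
  · rw [h3]; decide
  · rw [h4]; decide
  · rw [h5]; decide
  · rw [h6]; decide
  · simp [PySem.Dict.getD_insert, PySem.Dict.getD_empty, h1, h2, h3, h4, h5, h6]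

-- For a one-character prefix c, tn.startswith(c) is exactly tn[:1] == c.
theorem pv_startswith_eq_slice_beq (s c : String) (ch : Char) (h : c.toList = [ch]) :
    PySem.Str.startswith s c = (PySem.Str.slice s none (some 1) == c) := by
  have hslice : (PySem.Str.slice s none (some 1)).toList = s.toList.take 1 := by
    rw [PySem.Str.toList_slice]
    simp [pysem]
  rw [Bool.eq_iff_iff]
  simp only [PySem.Str.startswith, PySem.Chars.startswith, h, beq_iff_eq,
    ← String.toList_inj, hslice]
  cases s.toList with
  | nil => simp [List.isPrefixOf]
  | cons a t => simp [List.isPrefixOf]; exact ⟨fun hx => hx.symm, fun hx => hx.symm⟩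

-- the fold's minimum is ≤ k iff the seed is or some element's rank is
theorem pv_fold_le (l : List String) (b k : Nat) :
    (l.foldl (fun b tn => min b (pvRankOf tn)) b ≤ k)
      ↔ (b ≤ k ∨ ∃ tn ∈ l, pvRankOf tn ≤ k) := by
  induction l generalizing b with
  | nil => simp
  | cons t l ih =>
      simp only [List.foldl_cons, ih, min_le_iff, List.mem_cons]
      constructor
      · rintro ((h | h) | ⟨tn, htn, h⟩)
        · exact Or.inl h
        · exact Or.inr ⟨t, Or.inl rfl, h⟩
        · exact Or.inr ⟨tn, Or.inr htn, h⟩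
      · rintro (h | ⟨tn, htn | htn, h⟩)
        · exact Or.inl (Or.inl h)
        · exact Or.inl (Or.inr (htn ▸ h))
        · exact Or.inr ⟨tn, htn, h⟩



-- pvRankOf takes the value 0 exactly on strings starting with "C"
theorem pv_rank_eq_iff_C (tn : String) :
    pvRankOf tn = 0 ↔ PySem.Str.startswith tn "C" = true := by
  rw [pv_startswith_eq_slice_beq tn "C" 'C' rfl, pvRankOf_eq]
  split_ifs <;> simp_all

-- pvRankOf takes the value 1 exactly on strings starting with "D"
theorem pv_rank_eq_iff_D (tn : String) :
    pvRankOf tn = 1 ↔ PySem.Str.startswith tn "D" = true := by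
  rw [pv_startswith_eq_slice_beq tn "D" 'D' rfl, pvRankOf_eq]
  split_ifs <;> simp_all

-- pvRankOf takes the value 2 exactly on strings starting with "B"
theorem pv_rank_eq_iff_B (tn : String) :
    pvRankOf tn = 2 ↔ PySem.Str.startswith tn "B" = true := by
  rw [pv_startswith_eq_slice_beq tn "B" 'B' rfl, pvRankOf_eq]
  split_ifs <;> simp_all

-- pvRankOf takes the value 3 exactly on strings starting with "A"
theorem pv_rank_eq_iff_A (tn : String) :
    pvRankOf tn = 3 ↔ PySem.Str.startswith tn "A" = true := by
  rw [pv_startswith_eq_slice_beq tn "A" 'A' rfl, pvRankOf_eq]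
  split_ifs <;> simp_all

-- pvRankOf takes the value 4 exactly on strings starting with "G"
theorem pv_rank_eq_iff_G (tn : String) :
    pvRankOf tn = 4 ↔ PySem.Str.startswith tn "G" = true := by
  rw [pv_startswith_eq_slice_beq tn "G" 'G' rfl, pvRankOf_eq]
  split_ifs <;> simp_all

-- pvRankOf takes the value 5 exactly on strings starting with "F"
theorem pv_rank_eq_iff_F (tn : String) :
    pvRankOf tn = 5 ↔ PySem.Str.startswith tn "F" = true := by
  rw [pv_startswith_eq_slice_beq tn "F" 'F' rfl, pvRankOf_eq]
  split_ifs <;> simp_all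

-- ===== VERDICT (by name: the statement is the Claim_ definition above) =====
theorem classify_mesh_entry_py_spec : Claim_equal_classify_mesh_entry_py := by
  intro l _
  unfold Spec_classify_mesh_entry_py classify_mesh_entry_py
  rw [show classify_mesh_entry_py_alt l
      = (PySem.List.pyGet? pvLabels
          (Int.ofNat (l.foldl (fun b tn => min b (pvRankOf tn)) 6))).getD "CHEMICAL" from rfl]
  set best := l.foldl (fun b tn => min b (pvRankOf tn)) 6 with hbest
  by_cases hC : l.any (fun tn => PySem.Str.startswith tn "C") = true
  · obtain ⟨tn, htn, hs⟩ := List.any_eq_true.mp hC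
    have hle : best ≤ 0 := (pv_fold_le l 6 0).mpr (Or.inr ⟨tn, htn, le_of_eq ((pv_rank_eq_iff_C tn).mpr hs)⟩)
    have hbe : best = 0 := Nat.le_zero.mp hle
    simp only [hC, if_true]
    rw [hbe]; decide
  · have hCf : l.any (fun tn => PySem.Str.startswith tn "C") = false := by simpa using hC
    by_cases hD : l.any (fun tn => PySem.Str.startswith tn "D") = true
    · obtain ⟨tn, htn, hs⟩ := List.any_eq_true.mp hD
      have hle : best ≤ 1 := (pv_fold_le l 6 1).mpr (Or.inr ⟨tn, htn, le_of_eq ((pv_rank_eq_iff_D tn).mpr hs)⟩)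
      have hne : ∀ tn' ∈ l, ¬ pvRankOf tn' ≤ 0 := by
        intro tn' htn' hr
        have hcases : pvRankOf tn' = 0 := by omega
        exact (List.any_eq_false.mp hCf tn' htn') ((pv_rank_eq_iff_C tn').mp hcases)
      have hbe : best = 1 := by
        by_contra hnek
        have hlt : best ≤ 0 := by omega
        rcases (pv_fold_le l 6 0).mp hlt with h6 | ⟨tn', htn', hr⟩
        · omega
        · exact hne tn' htn' hr
      simp only [hCf, hD, if_true, Bool.false_eq_true, if_false]
      rw [hbe]; decide
    · have hDf : l.any (fun tn => PySem.Str.startswith tn "D") = false := by simpa using hD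
      by_cases hB : l.any (fun tn => PySem.Str.startswith tn "B") = true
      · obtain ⟨tn, htn, hs⟩ := List.any_eq_true.mp hB
        have hle : best ≤ 2 := (pv_fold_le l 6 2).mpr (Or.inr ⟨tn, htn, le_of_eq ((pv_rank_eq_iff_B tn).mpr hs)⟩)
        have hne : ∀ tn' ∈ l, ¬ pvRankOf tn' ≤ 1 := by
          intro tn' htn' hr
          have hcases : pvRankOf tn' = 0 ∨ pvRankOf tn' = 1 := by omega
          rcases hcases with hv | hv
          · exact (List.any_eq_false.mp hCf tn' htn') ((pv_rank_eq_iff_C tn').mp hv)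
          · exact (List.any_eq_false.mp hDf tn' htn') ((pv_rank_eq_iff_D tn').mp hv)
        have hbe : best = 2 := by
          by_contra hnek
          have hlt : best ≤ 1 := by omega
          rcases (pv_fold_le l 6 1).mp hlt with h6 | ⟨tn', htn', hr⟩
          · omega
          · exact hne tn' htn' hr
        simp only [hCf, hDf, hB, if_true, Bool.false_eq_true, if_false]
        rw [hbe]; decide
      · have hBf : l.any (fun tn => PySem.Str.startswith tn "B") = false := by simpa using hB
        by_cases hA : l.any (fun tn => PySem.Str.startswith tn "A") = true
        · obtain ⟨tn, htn, hs⟩ := List.any_eq_true.mp hA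
          have hle : best ≤ 3 := (pv_fold_le l 6 3).mpr (Or.inr ⟨tn, htn, le_of_eq ((pv_rank_eq_iff_A tn).mpr hs)⟩)
          have hne : ∀ tn' ∈ l, ¬ pvRankOf tn' ≤ 2 := by
            intro tn' htn' hr
            have hcases : pvRankOf tn' = 0 ∨ pvRankOf tn' = 1 ∨ pvRankOf tn' = 2 := by omega
            rcases hcases with hv | hv | hv
            · exact (List.any_eq_false.mp hCf tn' htn') ((pv_rank_eq_iff_C tn').mp hv)
            · exact (List.any_eq_false.mp hDf tn' htn') ((pv_rank_eq_iff_D tn').mp hv)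
            · exact (List.any_eq_false.mp hBf tn' htn') ((pv_rank_eq_iff_B tn').mp hv)
          have hbe : best = 3 := by
            by_contra hnek
            have hlt : best ≤ 2 := by omega
            rcases (pv_fold_le l 6 2).mp hlt with h6 | ⟨tn', htn', hr⟩
            · omega
            · exact hne tn' htn' hr
          simp only [hCf, hDf, hBf, hA, if_true, Bool.false_eq_true, if_false]
          rw [hbe]; decide
        · have hAf : l.any (fun tn => PySem.Str.startswith tn "A") = false := by simpa using hA
          by_cases hG : l.any (fun tn => PySem.Str.startswith tn "G") = true
          · obtain ⟨tn, htn, hs⟩ := List.any_eq_true.mp hG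
            have hle : best ≤ 4 := (pv_fold_le l 6 4).mpr (Or.inr ⟨tn, htn, le_of_eq ((pv_rank_eq_iff_G tn).mpr hs)⟩)
            have hne : ∀ tn' ∈ l, ¬ pvRankOf tn' ≤ 3 := by
              intro tn' htn' hr
              have hcases : pvRankOf tn' = 0 ∨ pvRankOf tn' = 1 ∨ pvRankOf tn' = 2 ∨ pvRankOf tn' = 3 := by omega
              rcases hcases with hv | hv | hv | hv
              · exact (List.any_eq_false.mp hCf tn' htn') ((pv_rank_eq_iff_C tn').mp hv)
              · exact (List.any_eq_false.mp hDf tn' htn') ((pv_rank_eq_iff_D tn').mp hv)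
              · exact (List.any_eq_false.mp hBf tn' htn') ((pv_rank_eq_iff_B tn').mp hv)
              · exact (List.any_eq_false.mp hAf tn' htn') ((pv_rank_eq_iff_A tn').mp hv)
            have hbe : best = 4 := by
              by_contra hnek
              have hlt : best ≤ 3 := by omega
              rcases (pv_fold_le l 6 3).mp hlt with h6 | ⟨tn', htn', hr⟩
              · omega
              · exact hne tn' htn' hr
            simp only [hCf, hDf, hBf, hAf, hG, if_true, Bool.false_eq_true, if_false]
            rw [hbe]; decide
          · have hGf : l.any (fun tn => PySem.Str.startswith tn "G") = false := by simpa using hG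
            by_cases hF : l.any (fun tn => PySem.Str.startswith tn "F") = true
            · obtain ⟨tn, htn, hs⟩ := List.any_eq_true.mp hF
              have hle : best ≤ 5 := (pv_fold_le l 6 5).mpr (Or.inr ⟨tn, htn, le_of_eq ((pv_rank_eq_iff_F tn).mpr hs)⟩)
              have hne : ∀ tn' ∈ l, ¬ pvRankOf tn' ≤ 4 := by
                intro tn' htn' hr
                have hcases : pvRankOf tn' = 0 ∨ pvRankOf tn' = 1 ∨ pvRankOf tn' = 2 ∨ pvRankOf tn' = 3 ∨ pvRankOf tn' = 4 := by omega
                rcases hcases with hv | hv | hv | hv | hv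
                · exact (List.any_eq_false.mp hCf tn' htn') ((pv_rank_eq_iff_C tn').mp hv)
                · exact (List.any_eq_false.mp hDf tn' htn') ((pv_rank_eq_iff_D tn').mp hv)
                · exact (List.any_eq_false.mp hBf tn' htn') ((pv_rank_eq_iff_B tn').mp hv)
                · exact (List.any_eq_false.mp hAf tn' htn') ((pv_rank_eq_iff_A tn').mp hv)
                · exact (List.any_eq_false.mp hGf tn' htn') ((pv_rank_eq_iff_G tn').mp hv)
              have hbe : best = 5 := by
                by_contra hnek
                have hlt : best ≤ 4 := by omega
                rcases (pv_fold_le l 6 4).mp hlt with h6 | ⟨tn', htn', hr⟩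
                · omega
                · exact hne tn' htn' hr
              simp only [hCf, hDf, hBf, hAf, hGf, hF, if_true, Bool.false_eq_true, if_false]
              rw [hbe]; decide
            · have hFf : l.any (fun tn => PySem.Str.startswith tn "F") = false := by simpa using hF
              have hne : ∀ tn' ∈ l, ¬ pvRankOf tn' ≤ 5 := by
                intro tn' htn' hr
                have hcases : pvRankOf tn' = 0 ∨ pvRankOf tn' = 1 ∨ pvRankOf tn' = 2 ∨ pvRankOf tn' = 3 ∨ pvRankOf tn' = 4 ∨ pvRankOf tn' = 5 := by omega
                rcases hcases with hv | hv | hv | hv | hv | hv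
                · exact (List.any_eq_false.mp hCf tn' htn') ((pv_rank_eq_iff_C tn').mp hv)
                · exact (List.any_eq_false.mp hDf tn' htn') ((pv_rank_eq_iff_D tn').mp hv)
                · exact (List.any_eq_false.mp hBf tn' htn') ((pv_rank_eq_iff_B tn').mp hv)
                · exact (List.any_eq_false.mp hAf tn' htn') ((pv_rank_eq_iff_A tn').mp hv)
                · exact (List.any_eq_false.mp hGf tn' htn') ((pv_rank_eq_iff_G tn').mp hv)
                · exact (List.any_eq_false.mp hFf tn' htn') ((pv_rank_eq_iff_F tn').mp hv)
              have hle : best ≤ 6 := (pv_fold_le l 6 6).mpr (Or.inl le_rfl)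
              have hbe : best = 6 := by
                by_contra hnek
                have hlt : best ≤ 5 := by omega
                rcases (pv_fold_le l 6 5).mp hlt with h6 | ⟨tn', htn', hr⟩
                · omega
                · exact hne tn' htn' hr
              simp only [hCf, hDf, hBf, hAf, hGf, hFf, Bool.false_eq_true, if_false]
              rw [hbe]; decide
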